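-- pv_equiv track=rewrite | github.com/sinamajidian/Hap10 | old/results/utilities/nfinder_v3.py | nonNregion_extractor
-- ===== SOURCE A (Python) =====
-- def nonNregion_extractor(seq):
--
--     list_tuple_pos=[]
--     for idx, char in enumerate(seq):
--         if idx==0:
--             if char == 'N':
--                     start_pos=1
--         else:
--             previous_char=seq[idx-1]
--             if char == 'N':
--                 if previous_char != 'N': # new N region started
--                     start_pos=idx+1 #  0-index to genomic pos
--                     #else:  char =previous_char = 'N'
--             else: # char = 'A'
--                 if previous_char == 'N':
--                     lastN_idx=idx-1
--                     end_pos=lastN_idx+1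
--                     if end_pos-start_pos >13000 :
--                         list_tuple_pos.append((start_pos,end_pos))
--
--
--     list_tuple_pos_nonN=[]
--     if len(list_tuple_pos)>0:
--         for idx_nregion, tuple_pos in enumerate(list_tuple_pos):
--             previous_tuple_pos=list_tuple_pos[idx_nregion-1]
--             list_tuple_pos_nonN.append((previous_tuple_pos[1],tuple_pos[0]))
--         list_tuple_pos_nonN.append((tuple_pos[1],len(seq))) # last tuple
--         list_tuple_pos_nonN[0]=(1,list_tuple_pos[0][0]) # first tuple should be edited  by this line
--     else:
--         list_tuple_pos_nonN=[(1,len(seq))]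
--
--     return list_tuple_pos_nonN
-- ===== SOURCE B (Python) =====
-- def nonNregion_extractor(seq):
--     n = len(seq)
--     ns = [i for i, c in enumerate(seq) if c == 'N']
--     # block starts: N positions whose predecessor position holds no N
--     starts = [i for i, p in zip(ns, [None] + ns) if p != i - 1]
--     # block ends: N positions whose successor position holds no N
--     ends = [i for i, q in zip(ns, ns[1:] + [None]) if q != i + 1]
--     runs = [(s + 1, e + 1) for s, e in zip(starts, ends)
--             if e + 1 < n and e - s > 13000]
--     if not runs:
--         return [(1, n)]
--     return list(zip([1] + [e for _, e in runs], [s for s, _ in runs] + [n]))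
-- ===== Notes on version B (the rewrite author's own statement) =====
-- stated objective: alternative
-- what changed: Replaces A's char-by-char previous-char state machine (plus a second enumerate pass patched via a negative index and rewriting element 0) with a staged pipeline on the list of N positions: collect all N indices, mark block starts/ends by comparing each index with its neighbour in that list, zip starts with ends into runs, and emit the complementary intervals as one zip of shifted endpoint lists.
import Mathlib
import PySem

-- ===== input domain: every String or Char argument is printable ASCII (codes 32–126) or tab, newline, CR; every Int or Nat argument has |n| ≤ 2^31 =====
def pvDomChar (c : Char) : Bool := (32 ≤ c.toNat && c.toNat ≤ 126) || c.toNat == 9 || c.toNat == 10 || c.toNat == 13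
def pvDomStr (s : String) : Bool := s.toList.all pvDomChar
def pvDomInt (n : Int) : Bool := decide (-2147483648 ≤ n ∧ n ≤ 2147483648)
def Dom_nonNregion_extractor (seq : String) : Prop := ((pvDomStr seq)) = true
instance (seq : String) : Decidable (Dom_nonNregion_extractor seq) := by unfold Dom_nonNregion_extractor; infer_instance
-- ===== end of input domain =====

-- B replaces A's char-by-char previous-char state machine (plus a second enumerate pass patched
-- via a negative-index access and rewriting element 0) with a staged pipeline over the list of
-- N positions: collect N indices, mark block starts/ends by neighbour comparison in that list,
-- zip starts with ends, and emit the complementary intervals as a single zip; objective: alternative.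


-- ===== PORT A =====
-- one step of A's first loop; state = (list_tuple_pos, start_pos)
-- (Python's start_pos begins unbound but is never read before being set; the port starts it at 0)
def pvAStep (seq : String) (st : List (Int × Int) × Int) (p : Int × Char) : List (Int × Int) × Int :=
  let list_tuple_pos := st.1
  let start_pos := st.2
  let idx := p.1
  let char := p.2
  if idx = 0 then
    if char = 'N' then (list_tuple_pos, 1) else (list_tuple_pos, start_pos)
  else
    let previous_char := (PySem.Str.pyGet? seq (idx - 1)).getD ' '  -- 1 ≤ idx < len: always in range
    if char = 'N' then
      if previous_char ≠ 'N' then (list_tuple_pos, idx + 1) else (list_tuple_pos, start_pos)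
    else
      if previous_char = 'N' then
        let lastN_idx := idx - 1
        let end_pos := lastN_idx + 1
        if end_pos - start_pos > 13000 then
          (list_tuple_pos ++ [(start_pos, end_pos)], start_pos)
        else (list_tuple_pos, start_pos)
      else (list_tuple_pos, start_pos)

def nonNregion_extractor (seq : String) : List (Int × Int) :=
  let list_tuple_pos := ((PySem.List.enumerate seq.toList).foldl (pvAStep seq) ([], 0)).1
  if list_tuple_pos.length > 0 then
    let list_tuple_pos_nonN :=
      (PySem.List.enumerate list_tuple_pos).foldl
        (fun acc p =>
          let previous_tuple_pos := PySem.List.pyGetD list_tuple_pos (p.1 - 1) (0, 0)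
          acc ++ [(previous_tuple_pos.2, p.2.1)]) []
    -- after the loop, tuple_pos holds the LAST element of list_tuple_pos
    let tuple_pos := PySem.List.pyGetD list_tuple_pos (-1) (0, 0)
    let list_tuple_pos_nonN := list_tuple_pos_nonN ++ [(tuple_pos.2, (PySem.Str.len seq : Int))]
    -- list_tuple_pos_nonN[0] = (1, list_tuple_pos[0][0])
    PySem.List.pySetD list_tuple_pos_nonN 0 (1, (PySem.List.pyGetD list_tuple_pos 0 (0, 0)).1)
  else [(1, (PySem.Str.len seq : Int))]

-- ===== PORT B =====
-- ns = [i for i, c in enumerate(seq) if c == 'N']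
def pvNs (l : List Char) : List Int :=
  ((PySem.List.enumerate l).filter (fun p => p.2 == 'N')).map Prod.fst

def nonNregion_extractor_alt (seq : String) : List (Int × Int) :=
  let l := seq.toList
  let n : Int := l.length
  let ns := pvNs l
  -- starts = [i for i, p in zip(ns, [None] + ns) if p != i - 1]
  let starts := ((ns.zip ((none : Option Int) :: ns.map some)).filter
      (fun q => !(q.2 == some (q.1 - 1)))).map Prod.fst
  -- ends = [i for i, q in zip(ns, ns[1:] + [None]) if q != i + 1]
  let ends := ((ns.zip (ns.tail.map some ++ [none])).filter
      (fun q => !(q.2 == some (q.1 + 1)))).map Prod.fst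
  -- runs = [(s+1, e+1) for s, e in zip(starts, ends) if e+1 < n and e-s > 13000]
  let runs := (starts.zip ends).flatMap
      (fun p => if p.2 + 1 < n ∧ p.2 - p.1 > 13000 then [(p.1 + 1, p.2 + 1)] else [])
  if runs = [] then [(1, n)]
  else (1 :: runs.map Prod.snd).zip (runs.map Prod.fst ++ [n])

-- ===== PRECONDITION & SPEC =====
def Spec_nonNregion_extractor (seq : String) (out : List (Int × Int)) : Prop := out = nonNregion_extractor_alt seq
instance (seq : String) (out : List (Int × Int)) : Decidable (Spec_nonNregion_extractor seq out) := by unfold Spec_nonNregion_extractor; infer_instance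

-- ===== CLAIM (what is proved, stated in full; the proofs are below) =====
def Claim_equal_nonNregion_extractor : Prop := ∀ (seq : String), Dom_nonNregion_extractor seq → Spec_nonNregion_extractor seq (nonNregion_extractor seq)

-- ===== LEMMAS AND PROOFS =====

-- reference run extractor for A: position i, whether previous char was 'N', current start_pos
def pvSpec : List Char → Int → Bool → Int → List (Int × Int)
  | [], _, _, _ => []
  | c :: cs, i, prevN, sp =>
    if c = 'N' then pvSpec cs (i + 1) true (if prevN then sp else i + 1)
    else (if prevN ∧ i - sp > 13000 then [(sp, i)] else []) ++ pvSpec cs (i + 1) false sp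


theorem pvA_fold_eq (seq : String) (cs : List Char) (k : Nat) (acc : List (Int × Int))
    (sp : Int) (prevN : Bool)
    (hdrop : seq.toList.drop k = cs) (hk : 1 ≤ k)
    (hprev : (seq.toList.getD (k - 1) ' ' = 'N') = (prevN = true)) :
    ((PySem.List.enumerate cs (k : Int)).foldl (pvAStep seq) (acc, sp)).1
      = acc ++ pvSpec cs (k : Int) prevN sp := by
  induction cs generalizing k acc sp prevN with
  | nil => simp [PySem.List.enumerate, pvSpec]
  | cons c cs ih =>
    have hlen : k < seq.toList.length := by
      have h := congrArg List.length hdrop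
      rw [List.length_drop] at h
      simp only [List.length_cons] at h
      omega
    have hck2 : seq.toList[k]? = some c := by
      have h1 : (List.drop k seq.toList)[0]? = seq.toList[k + 0]? := List.getElem?_drop
      rw [hdrop] at h1
      simpa using h1.symm
    have hck : seq.toList.getD k ' ' = c := by simp [List.getD, hck2]
    have hget : (PySem.Str.pyGet? seq ((k : Int) - 1)).getD ' ' = seq.toList.getD (k - 1) ' ' := by
      have hc : ((k : Int) - 1) = ((k - 1 : Nat) : Int) := by omega
      rw [hc, PySem.Str.pyGet?_natCast]
      simp [List.getD]
    have hdrop' : seq.toList.drop (k + 1) = cs := by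
      have := congrArg List.tail hdrop
      simpa [List.tail_drop] using this
    rw [PySem.List.enumerate_cons]
    simp only [List.foldl_cons]
    have hk0 : ((k : Int) = 0) = False := by simp; omega
    by_cases hc : c = 'N'
    · -- char is 'N'
      by_cases hp : prevN
      · -- previous 'N': keep sp
        have : pvAStep seq (acc, sp) ((k : Int), c) = (acc, sp) := by
          simp only [pvAStep, hk0, hget]
          simp_all
        rw [this]
        have := ih (k + 1) acc sp true (by simpa using hdrop') (by omega)
          (by simp [List.getD, hck2, hc])
        simp only [pvSpec, hc, hp]
        push_cast at this ⊢
        simpa using this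
      · -- new run: sp := idx+1
        have : pvAStep seq (acc, sp) ((k : Int), c) = (acc, (k : Int) + 1) := by
          simp only [pvAStep, hk0, hget]
          simp_all
        rw [this]
        have := ih (k + 1) acc ((k : Int) + 1) true (by simpa using hdrop') (by omega)
          (by simp [List.getD, hck2, hc])
        simp only [pvSpec, hc, hp]
        push_cast at this ⊢
        simpa using this
    · -- char not 'N'
      by_cases hp : prevN
      · by_cases hbig : (k : Int) - 1 + 1 - sp > 13000
        · have : pvAStep seq (acc, sp) ((k : Int), c) = (acc ++ [(sp, (k : Int) - 1 + 1)], sp) := by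
            simp only [pvAStep, hk0, hget]
            simp_all
          rw [this]
          have := ih (k + 1) (acc ++ [(sp, (k : Int) - 1 + 1)]) sp false (by simpa using hdrop') (by omega)
            (by simp [List.getD, hck2, hc])
          simp only [pvSpec, hc, hp]
          push_cast at this ⊢
          simp only [this]
          have he : (k : Int) - 1 + 1 = (k : Int) := by ring
          rw [he] at *
          have hb' : (13000 : Int) < (k : Int) - sp := by omega
          simp [hb', List.append_assoc]
        · have : pvAStep seq (acc, sp) ((k : Int), c) = (acc, sp) := by
            simp only [pvAStep, hk0, hget]
            simp_all
          rw [this]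
          have := ih (k + 1) acc sp false (by simpa using hdrop') (by omega)
            (by simp [List.getD, hck2, hc])
          simp only [pvSpec, hc, hp]
          push_cast at this ⊢
          have he : (k : Int) - 1 + 1 = (k : Int) := by ring
          rw [he] at *
          have hb' : ¬ (13000 : Int) < (k : Int) - sp := by omega
          simp [hb', this]
      · have : pvAStep seq (acc, sp) ((k : Int), c) = (acc, sp) := by
          simp only [pvAStep, hk0, hget]
          simp_all
        rw [this]
        have := ih (k + 1) acc sp false (by simpa using hdrop') (by omega)
          (by simp [List.getD, hck2, hc])
        simp only [pvSpec, hc, hp]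
        push_cast at this ⊢
        simp [this]

-- A's first loop computes pvSpec from the origin
theorem pvA_runs (seq : String) :
    ((PySem.List.enumerate seq.toList).foldl (pvAStep seq) ([], 0)).1
      = pvSpec seq.toList 0 false 0 := by
  cases h : seq.toList with
  | nil => simp [PySem.List.enumerate_nil, pvSpec]
  | cons c rest =>
    rw [PySem.List.enumerate_cons]
    simp only [List.foldl_cons]
    have hstep : pvAStep seq ([], 0) (0, c) = ([], if c = 'N' then 1 else 0) := by
      by_cases hc : c = 'N' <;> simp [pvAStep, hc]
    rw [hstep]
    have hdrop : seq.toList.drop 1 = rest := by rw [h]; rfl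
    have hck02 : seq.toList[0]? = some c := by rw [h]; rfl
    have := pvA_fold_eq seq rest 1 [] (if c = 'N' then 1 else 0) (decide (c = 'N'))
      hdrop (by omega) (by by_cases hc : c = 'N' <;> simp [List.getD, hck02, hc])
    by_cases hc : c = 'N'
    · rw [show ((1 : Nat) : Int) = (1 : Int) by norm_num] at this
      simp only [hc, decide_true] at this
      simp only [pvSpec, hc]
      simpa using this
    · rw [show ((1 : Nat) : Int) = (1 : Int) by norm_num] at this
      simp only [hc, decide_false] at this
      simp only [pvSpec, hc]
      simpa using this

-- ---------- B-side reference machinery ----------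

-- N positions of cs, the first char having index k
def pvNsOf : List Char → Int → List Int
  | [], _ => []
  | c :: cs, k => (if c = 'N' then [k] else []) ++ pvNsOf cs (k + 1)

-- block starts, given the previous N position (if any)
def pvStartsP (p : Option Int) : List Int → List Int
  | [] => []
  | i :: is => (if p = some (i - 1) then [] else [i]) ++ pvStartsP (some i) is

-- block ends, by looking at the next N position
def pvEndsN : List Int → List Int
  | [] => []
  | i :: is => (if is.head? = some (i + 1) then [] else [i]) ++ pvEndsN is

-- maximal blocks of consecutive integers, as (first, last)
def pvBlocksAux (s cur : Int) : List Int → List (Int × Int)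
  | [] => [(s, cur)]
  | j :: js => if j = cur + 1 then pvBlocksAux s j js else (s, cur) :: pvBlocksAux j j js

def pvBlocksOf : List Int → List (Int × Int)
  | [] => []
  | i :: is => pvBlocksAux i i is

-- the kept runs (genomic coordinates) of a block list
def pvKept (n : Int) (bs : List (Int × Int)) : List (Int × Int) :=
  bs.flatMap (fun p => if p.2 + 1 < n ∧ p.2 - p.1 > 13000 then [(p.1 + 1, p.2 + 1)] else [])

theorem pvNs_eq_aux (cs : List Char) : ∀ (k : Int),
    ((PySem.List.enumerate cs k).filter (fun p => p.2 == 'N')).map Prod.fst = pvNsOf cs k := by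
  induction cs with
  | nil => intro k; simp [PySem.List.enumerate_nil, pvNsOf]
  | cons c cs ih =>
    intro k
    rw [PySem.List.enumerate_cons]
    by_cases hc : c = 'N' <;> simp [pvNsOf, hc, ih (k + 1)]

theorem pvNs_eq (l : List Char) : pvNs l = pvNsOf l 0 := by
  simpa [pvNs] using pvNs_eq_aux l 0

theorem pvStarts_eq (ns : List Int) : ∀ (p : Option Int),
    ((ns.zip (p :: ns.map some)).filter (fun q => !(q.2 == some (q.1 - 1)))).map Prod.fst
      = pvStartsP p ns := by
  induction ns with
  | nil => intro p; simp [pvStartsP]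
  | cons i is ih =>
    intro p
    simp only [List.map_cons, List.zip_cons_cons, List.filter_cons]
    by_cases hp : p = some (i - 1) <;> simp [pvStartsP, hp, ih (some i)]

theorem pvEnds_eq (ns : List Int) :
    ((ns.zip (ns.tail.map some ++ [none])).filter (fun q => !(q.2 == some (q.1 + 1)))).map Prod.fst
      = pvEndsN ns := by
  induction ns with
  | nil => simp [pvEndsN]
  | cons i is ih =>
    cases is with
    | nil => simp [pvEndsN]
    | cons j js =>
      have hzip : ((i :: j :: js).zip ((i :: j :: js).tail.map some ++ [none]))
          = (i, some j) :: ((j :: js).zip ((j :: js).tail.map some ++ [none])) := by simp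
      rw [hzip, List.filter_cons]
      have he : pvEndsN (i :: j :: js)
          = (if some j = some (i + 1) then [] else [i]) ++ pvEndsN (j :: js) := rfl
      rw [he]
      by_cases hj : j = i + 1
      · have hb : (!((i, some j).2 == some ((i, some j).1 + 1))) = false := by simp [hj]
        rw [hb, if_neg Bool.false_ne_true, ih, if_pos (by rw [hj]), List.nil_append]
      · have hb : (!((i, some j).2 == some ((i, some j).1 + 1))) = true := by simp [hj]
        rw [hb, if_pos rfl, List.map_cons, ih, if_neg (by simpa using hj)]
        rfl


theorem pvZip_blocksAux (ns : List Int) : ∀ (s cur : Int),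
    (s :: pvStartsP (some cur) ns).zip (pvEndsN (cur :: ns)) = pvBlocksAux s cur ns := by
  induction ns with
  | nil => intro s cur; simp [pvStartsP, pvEndsN, pvBlocksAux]
  | cons j js ih =>
    intro s cur
    have hs : pvStartsP (some cur) (j :: js)
        = (if some cur = some (j - 1) then [] else [j]) ++ pvStartsP (some j) js := rfl
    have he : pvEndsN (cur :: j :: js)
        = (if some j = some (cur + 1) then [] else [cur]) ++ pvEndsN (j :: js) := rfl
    by_cases hj : j = cur + 1
    · have h1 : some cur = some (j - 1) := by rw [hj]; norm_num
      have h2 : some j = some (cur + 1) := by rw [hj]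
      rw [hs, he, if_pos h1, if_pos h2, List.nil_append, List.nil_append, ih s j]
      simp [pvBlocksAux, hj]
    · have h1 : ¬ some cur = some (j - 1) := by simp; omega
      have h2 : ¬ some j = some (cur + 1) := by simpa using hj
      rw [hs, he, if_neg h1, if_neg h2, List.singleton_append, List.singleton_append,
        List.zip_cons_cons, ih j j]
      simp [pvBlocksAux, hj]


theorem pvZip_blocks (ns : List Int) :
    (pvStartsP none ns).zip (pvEndsN ns) = pvBlocksOf ns := by
  cases ns with
  | nil => simp [pvStartsP, pvEndsN, pvBlocksOf]
  | cons i is =>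
    simp only [pvStartsP, pvBlocksOf]
    simpa using pvZip_blocksAux is i i

theorem pvNsOf_ge (cs : List Char) : ∀ (k : Int), ∀ x ∈ pvNsOf cs k, k ≤ x := by
  induction cs with
  | nil => intro k x hx; simp [pvNsOf] at hx
  | cons c cs ih =>
    intro k x hx
    simp only [pvNsOf, List.mem_append] at hx
    rcases hx with hx | hx
    · split at hx <;> simp_all
    · have := ih (k + 1) x hx; omega

theorem pvBlocksAux_break (s cur : Int) (ns : List Int)
    (h : ∀ x ∈ ns, x ≠ cur + 1) :
    pvBlocksAux s cur ns = (s, cur) :: pvBlocksOf ns := by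
  cases ns with
  | nil => simp [pvBlocksAux, pvBlocksOf]
  | cons j js =>
    have : j ≠ cur + 1 := h j (by simp)
    simp [pvBlocksAux, pvBlocksOf, this]

-- the central bridge: A's run extractor equals kept blocks of the N-position list
theorem pvSpec_blocks (l : List Char) : ∀ (cs : List Char) (i : Nat), cs = l.drop i →
    (∀ sp, pvSpec cs (i : Int) false sp = pvKept (l.length : Int) (pvBlocksOf (pvNsOf cs (i : Int)))) ∧
    (∀ sp, pvSpec cs (i : Int) true sp
        = pvKept (l.length : Int) (pvBlocksAux (sp - 1) ((i : Int) - 1) (pvNsOf cs (i : Int)))) := by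
  intro cs
  induction cs with
  | nil =>
    intro i hdrop
    have hin : l.length ≤ i := by
      have := congrArg List.length hdrop
      rw [List.length_drop] at this
      simp only [List.length_nil] at this
      omega
    constructor
    · intro sp; simp [pvSpec, pvNsOf, pvBlocksOf, pvKept]
    · intro sp
      simp [pvSpec, pvNsOf, pvBlocksAux, pvKept]
      omega
  | cons c cs ih =>
    intro i hdrop
    have hlen : i < l.length := by
      have := congrArg List.length hdrop
      rw [List.length_drop] at this
      simp only [List.length_cons] at this
      omega
    have hdrop' : cs = l.drop (i + 1) := by
      have h := congrArg List.tail hdrop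
      rw [List.tail_cons, List.tail_drop] at h
      exact h
    have ih' := ih (i + 1) hdrop'
    have hone : ((i : Int)) + 1 = ((i + 1 : Nat) : Int) := by push_cast; ring
    have hi1 : (((i + 1 : Nat) : Int)) - 1 = (i : Int) := by push_cast; ring
    by_cases hc : c = 'N'
    · subst hc
      have hSN_f : ∀ (k sp : Int), pvSpec ('N' :: cs) k false sp = pvSpec cs (k + 1) true (k + 1) := by
        intro k sp; simp [pvSpec]
      have hSN_t : ∀ (k sp : Int), pvSpec ('N' :: cs) k true sp = pvSpec cs (k + 1) true sp := by
        intro k sp; simp [pvSpec]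
      have hN : ∀ (k : Int), pvNsOf ('N' :: cs) k = k :: pvNsOf cs (k + 1) := by
        intro k; simp [pvNsOf]
      constructor
      · intro sp
        rw [hSN_f, hN, hone, ih'.2 (((i + 1 : Nat) : Int))]
        rw [show pvBlocksOf ((i : Int) :: pvNsOf cs (((i + 1 : Nat) : Int)))
            = pvBlocksAux (i : Int) (i : Int) (pvNsOf cs (((i + 1 : Nat) : Int))) from rfl]
        rw [hi1]
      · intro sp
        rw [hSN_t, hN, hone, ih'.2 sp, hi1]
        have hb : pvBlocksAux (sp - 1) ((i : Int) - 1) ((i : Int) :: pvNsOf cs (((i + 1 : Nat) : Int)))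
            = pvBlocksAux (sp - 1) (i : Int) (pvNsOf cs (((i + 1 : Nat) : Int))) := by
          simp only [pvBlocksAux]
          rw [if_pos (show (i : Int) = (i : Int) - 1 + 1 by ring)]
        rw [hb]
    · have hSX_f : ∀ (k sp : Int), pvSpec (c :: cs) k false sp = pvSpec cs (k + 1) false sp := by
        intro k sp; simp [pvSpec, hc]
      have hSX_t : ∀ (k sp : Int), pvSpec (c :: cs) k true sp
          = (if k - sp > 13000 then [(sp, k)] else []) ++ pvSpec cs (k + 1) false sp := by
        intro k sp; simp [pvSpec, hc]
      have hNX : ∀ (k : Int), pvNsOf (c :: cs) k = pvNsOf cs (k + 1) := by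
        intro k; simp [pvNsOf, hc]
      constructor
      · intro sp
        rw [hSX_f, hNX, hone, ih'.1 sp]
      · intro sp
        have hge := pvNsOf_ge cs (((i + 1 : Nat) : Int))
        have hbreak : pvBlocksAux (sp - 1) ((i : Int) - 1) (pvNsOf cs (((i + 1 : Nat) : Int)))
            = (sp - 1, (i : Int) - 1) :: pvBlocksOf (pvNsOf cs (((i + 1 : Nat) : Int))) := by
          apply pvBlocksAux_break
          intro x hx
          have := hge x hx
          push_cast at this
          omega
        have hkc : ∀ (p : Int × Int) (B : List (Int × Int)),
            pvKept ((l.length : Nat) : Int) (p :: B)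
              = (if p.2 + 1 < ((l.length : Nat) : Int) ∧ p.2 - p.1 > 13000
                  then [(p.1 + 1, p.2 + 1)] else []) ++ pvKept ((l.length : Nat) : Int) B := by
          intro p B; simp [pvKept]
        have hif : (if ((i : Int) - 1) + 1 < ((l.length : Nat) : Int) ∧ ((i : Int) - 1) - (sp - 1) > 13000
              then [((sp - 1) + 1, ((i : Int) - 1) + 1)] else [])
            = (if (i : Int) - sp > 13000 then [(sp, (i : Int))] else []) := by
          rw [show ((i : Int) - 1) + 1 = (i : Int) by ring, show (sp - 1) + 1 = sp by ring]
          by_cases hbig : (i : Int) - sp > 13000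
          · rw [if_pos hbig, if_pos ⟨by omega, by omega⟩]
          · rw [if_neg hbig, if_neg (by intro h; have := h.2; omega)]
        rw [hSX_t, hNX, hone, hbreak, hkc, hif, ih'.1 sp]


-- gaps list used to describe A's second phase
def pvBGaps (runs : List (Int × Int)) : List (Int × Int) :=
  (runs.zip runs.tail).map (fun p => (p.1.2, p.2.1))

theorem pvSetD_zero_cons (x v : Int × Int) (xs : List (Int × Int)) :
    PySem.List.pySetD (x :: xs) 0 v = v :: xs := by
  simp [PySem.List.pySetD, PySem.List.pySet?, PySem.List.pyIdx?]

theorem pvGapAux (runs : List (Int × Int)) :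
    ∀ (rs : List (Int × Int)) (k : Nat), runs.drop (k + 1) = rs → k + 1 ≤ runs.length →
    (PySem.List.enumerate rs ((k : Int) + 1)).map
        (fun p => ((PySem.List.pyGetD runs (p.1 - 1) (0, 0)).2, p.2.1))
      = ((runs.drop k).zip rs).map (fun p => (p.1.2, p.2.1)) := by
  intro rs
  induction rs with
  | nil => intro k _ _; simp [PySem.List.enumerate_nil]
  | cons x rs' ih =>
    intro k hdrop hk
    have hkl : k < runs.length := by omega
    have hk1l : k + 1 < runs.length := by
      have := congrArg List.length hdrop
      rw [List.length_drop] at this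
      simp only [List.length_cons] at this
      omega
    have hdrop' : runs.drop (k + 1 + 1) = rs' := by
      have := congrArg List.tail hdrop
      simpa [List.tail_drop] using this
    have hdk : runs.drop k = runs[k] :: (x :: rs') := by
      rw [List.drop_eq_getElem_cons hkl, hdrop]
    rw [PySem.List.enumerate_cons]
    simp only [List.map_cons]
    have hgk : PySem.List.pyGetD runs ((k : Int) + 1 - 1) (0, 0) = runs[k] := by
      have : ((k : Int) + 1 - 1) = ((k : Nat) : Int) := by ring
      rw [this, PySem.List.pyGetD_natCast]
      exact List.getD_eq_getElem runs (0, 0) hkl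
    have hih := ih (k + 1) hdrop' (by omega)
    have hcast : ((k : Int) + 1 + 1) = (((k + 1 : Nat) : Int) + 1) := by push_cast; ring
    rw [hcast, hih, hdk]
    have hdk1 : runs.drop (k + 1) = x :: rs' := hdrop
    rw [hdk1]
    simp [List.getElem?_eq_getElem hkl]

-- second phase: A's gap construction in closed form
theorem pvPhase2 (runs : List (Int × Int)) (hne : runs ≠ []) (N : Int) :
    PySem.List.pySetD
      (((PySem.List.enumerate runs).foldl
          (fun acc p => acc ++ [((PySem.List.pyGetD runs (p.1 - 1) (0, 0)).2, p.2.1)]) [])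
        ++ [((PySem.List.pyGetD runs (-1) (0, 0)).2, N)])
      0 (1, (PySem.List.pyGetD runs 0 (0, 0)).1)
    = ((1, (runs.headD (0,0)).1) :: pvBGaps runs) ++ [((runs.getLastD (0, 0)).2, N)] := by
  rcases runs with _ | ⟨r, rs⟩
  · exact absurd rfl hne
  rw [PySem.List.foldl_append_singleton_eq_map]
  rw [PySem.List.enumerate_cons]
  simp only [List.map_cons]
  have h1 : (PySem.List.enumerate rs ((0 : Int) + 1)).map
      (fun p => ((PySem.List.pyGetD (r :: rs) (p.1 - 1) (0, 0)).2, p.2.1))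
      = (((r :: rs).drop 0).zip rs).map (fun p => (p.1.2, p.2.1)) :=
    pvGapAux (r :: rs) rs 0 rfl (by simp)
  rw [h1]
  rw [show ((0 : Int) - 1) = (-1 : Int) from by norm_num]
  have hlast : PySem.List.pyGetD (r :: rs) (-1) (0, 0) = (r :: rs).getLastD (0, 0) := by
    rw [PySem.List.pyGetD_neg_one (r :: rs) (0, 0) (by simp)]
    exact Prod.ext rfl rfl
  rw [hlast, List.nil_append, List.cons_append, pvSetD_zero_cons]
  simp [pvBGaps, PySem.List.pyGetD_zero_cons]

-- B's final zip equals the gaps form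
theorem pvZipGaps_aux (rs : List (Int × Int)) : ∀ (r : Int × Int) (N : Int),
    (r.2 :: rs.map Prod.snd).zip (rs.map Prod.fst ++ [N])
      = pvBGaps (r :: rs) ++ [(((r :: rs).getLastD (0, 0)).2, N)] := by
  induction rs with
  | nil => intro r N; simp [pvBGaps]
  | cons s ss ih =>
    intro r N
    simp only [List.map_cons, List.cons_append, List.zip_cons_cons]
    rw [ih s N]
    simp [pvBGaps]

theorem pvZipGaps (r : Int × Int) (rs : List (Int × Int)) (N : Int) :
    (1 :: (r :: rs).map Prod.snd).zip ((r :: rs).map Prod.fst ++ [N])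
      = ((1, r.1) :: pvBGaps (r :: rs)) ++ [(((r :: rs).getLastD (0, 0)).2, N)] := by
  simp only [List.map_cons, List.cons_append, List.zip_cons_cons]
  rw [pvZipGaps_aux rs r N]

-- ===== VERDICT (by name: the statement is the Claim_ definition above) =====
theorem nonNregion_extractor_spec : Claim_equal_nonNregion_extractor := by
  intro seq _
  unfold Spec_nonNregion_extractor nonNregion_extractor nonNregion_extractor_alt
  simp only []
  rw [pvA_runs]
  rw [pvNs_eq, pvStarts_eq, pvEnds_eq, pvZip_blocks]
  have hspec := (pvSpec_blocks seq.toList seq.toList 0 (by simp)).1 0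
  rw [show ((0 : Nat) : Int) = (0 : Int) from rfl] at hspec
  rw [hspec]
  have hkept : (pvBlocksOf (pvNsOf seq.toList 0)).flatMap
        (fun p => if p.2 + 1 < (seq.toList.length : Int) ∧ p.2 - p.1 > 13000
          then [(p.1 + 1, p.2 + 1)] else [])
      = pvKept (seq.toList.length : Int) (pvBlocksOf (pvNsOf seq.toList 0)) := rfl
  rw [hkept]
  cases hR : pvKept (seq.toList.length : Int) (pvBlocksOf (pvNsOf seq.toList 0)) with
  | nil => simp [PySem.Str.len_eq]
  | cons r rs =>
    simp only [List.length_cons]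
    rw [if_pos (by omega), if_neg (by simp)]
    rw [pvPhase2 (r :: rs) (by simp) (PySem.Str.len seq)]
    rw [pvZipGaps r rs ((seq.toList.length : Int))]
    simp [PySem.Str.len_eq]
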